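-- pv_equiv track=rewrite | github.com/msexton1519/math_extended | math_extended.py | sum_of_divisors2
-- ===== SOURCE A (Python) =====
-- import math
--
-- def validation(num, less_than=1):
--     if not isinstance(num, int):
--         raise ValueError("Input must be an integer.")
--     if num < less_than:
--         raise ValueError(f'Argument must be greater than or equal to {less_than}')
--
-- def prime_factors2(num):
--     validation(num, 2)
--     factor = 2
--     sqrt = math.sqrt(num)
--     factors = []
--     counter = 0
--     # Remove all factors of 2 first, since all other primes are odd or nonexistent.
--     while num % 2 == 0:
--         counter += 1
--         num //= 2
--     if counter > 0:
--         factors.append((2, counter))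
--         counter = 0
--     # Now deal with all other odd primes, if they exist.
--     factor += 1
--     while factor <= sqrt:
--         while num % factor == 0:
--             num //= factor
--             counter += 1
--         if counter > 0:
--             factors.append((factor, counter))
--         counter = 0
--         factor += 2
--         sqrt = math.sqrt(num)
--     # If the input number isn't 1, it is still a prime in which case, add it as one occurrence to factors.
--     if num > 1:
--         factors.append((num, counter + 1))
--     return factors
--
-- def sum_of_divisors2(num, power=1):
--     from functools import reduce
--     validation(num, 1)
--     validation(power, 1)
--     primes = prime_factors2(num)
--     total = 1
--     for (prime, exp) in primes:
--         total *= (prime ** (power * (exp + 1)) - 1) // (prime ** power - 1)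
--     return total
-- ===== SOURCE B (Python) =====
-- def validation(num, less_than=1):
--     if not isinstance(num, int):
--         raise ValueError("Input must be an integer.")
--     if num < less_than:
--         raise ValueError(f'Argument must be greater than or equal to {less_than}')
--
-- def sum_of_divisors2(num, power=1):
--     # Direct divisor enumeration up to sqrt(num), pairing each small
--     # divisor i with its cofactor num // i.
--     validation(num, 1)
--     validation(power, 1)
--     total = 0
--     i = 1
--     while i * i <= num:
--         if num % i == 0:
--             total += i ** power
--             q = num // i
--             if q != i:
--                 total += q ** power
--         i += 1
--     return total
-- ===== Notes on version B (the rewrite author's own statement) =====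
-- stated objective: alternative
-- what changed: B sums d**power directly over divisors found by trial division up to sqrt(num) (pairing i with num//i), instead of A's prime factorization followed by the multiplicative geometric-series product formula.
import Mathlib
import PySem

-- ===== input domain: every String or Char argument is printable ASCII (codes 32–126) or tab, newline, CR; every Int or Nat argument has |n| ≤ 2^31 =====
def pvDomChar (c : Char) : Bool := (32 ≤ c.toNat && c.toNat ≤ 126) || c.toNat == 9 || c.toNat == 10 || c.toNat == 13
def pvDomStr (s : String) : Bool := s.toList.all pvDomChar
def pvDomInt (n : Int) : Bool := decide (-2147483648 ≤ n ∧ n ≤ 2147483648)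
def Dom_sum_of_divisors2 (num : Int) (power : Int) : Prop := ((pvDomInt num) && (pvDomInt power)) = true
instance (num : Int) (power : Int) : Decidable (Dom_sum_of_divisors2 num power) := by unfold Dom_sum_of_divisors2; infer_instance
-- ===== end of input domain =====

-- B replaces A's prime factorization + geometric-series product formula with direct
-- divisor enumeration up to sqrt(num), pairing each small divisor with its cofactor
-- (objective: alternative algorithm of the same asymptotic cost).

-- ===== PORT A =====
-- inner `while num % f == 0: num //= f; counter += 1` of prime_factors2
-- (fuel = the starting value of num, always sufficient since num at least halves each step)
def pvTrial (fuel : Nat) (m f c : Int) : Int × Int :=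
  match fuel with
  | 0 => (m, c)
  | fuel + 1 =>
      if PySem.Int.mod m f = 0 then pvTrial fuel (PySem.Int.floordiv m f) f (c + 1)
      else (m, c)

-- outer `while factor <= sqrt: … factor += 2; sqrt = math.sqrt(num)` loop.
-- `sq` is the integer whose float sqrt the Python bound is: for 3 ≤ factor and
-- 0 ≤ sq ≤ 2^31 the comparison `factor <= math.sqrt(sq)` is exactly `factor * factor ≤ sq`
-- (math.sqrt is correctly rounded and the gap to the nearest integer exceeds half an ulp).
def pvOdd (fuel : Nat) (m factor sq : Int) (acc : List (Int × Int)) : Int × List (Int × Int) :=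
  match fuel with
  | 0 => (m, acc)
  | fuel + 1 =>
      if factor * factor ≤ sq then
        let r := pvTrial m.toNat m factor 0
        pvOdd fuel r.1 (factor + 2) r.1 (if 0 < r.2 then acc ++ [(factor, r.2)] else acc)
      else (m, acc)

def pvPrimeFactors2 (num : Int) : List (Int × Int) :=
  let r2 := pvTrial num.toNat num 2 0
  let acc0 := if 0 < r2.2 then [((2 : Int), r2.2)] else []
  let ro := pvOdd num.toNat r2.1 3 num acc0
  if 1 < ro.1 then ro.2 ++ [(ro.1, 0 + 1)] else ro.2

-- `validation(num, 1)`, `validation(power, 1)` and prime_factors2's `validation(num, 2)`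
-- only raise; the inputs on which they raise are excluded by Pre_.
def sum_of_divisors2 (num : Int) (power : Int) : Int :=
  (pvPrimeFactors2 num).foldl
    (fun t pe =>
      t * PySem.Int.floordiv (pe.1 ^ (power * (pe.2 + 1)).toNat - 1) (pe.1 ^ power.toNat - 1))
    1

-- ===== PORT B =====
-- `while i * i <= num: if num % i == 0: total += i**power (+ cofactor); i += 1`
def pvSumLoop (fuel : Nat) (num power i total : Int) : Int :=
  match fuel with
  | 0 => total
  | fuel + 1 =>
      if i * i ≤ num then
        pvSumLoop fuel num power (i + 1)
          (if PySem.Int.mod num i = 0 then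
            (total + i ^ power.toNat) +
              (if PySem.Int.floordiv num i ≠ i then (PySem.Int.floordiv num i) ^ power.toNat else 0)
          else total)
      else total

def sum_of_divisors2_alt (num : Int) (power : Int) : Int :=
  pvSumLoop (num.toNat + 1) num power 1 0

-- ===== PRECONDITION & SPEC =====
-- A raises ValueError when num < 2 (validation(num,2) inside prime_factors2, also
-- validation(num,1)) or power < 1 (validation(power,1)); exactly those are excluded.
def Pre_sum_of_divisors2 (num : Int) (power : Int) : Prop := 2 ≤ num ∧ 1 ≤ power
instance (num : Int) (power : Int) : Decidable (Pre_sum_of_divisors2 num power) := by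
  unfold Pre_sum_of_divisors2; infer_instance

def pvWitness_sum_of_divisors2 : Int × Int := (12, 2)

def Spec_sum_of_divisors2 (num : Int) (power : Int) (out : Int) : Prop :=
  out = sum_of_divisors2_alt num power
instance (num : Int) (power : Int) (out : Int) : Decidable (Spec_sum_of_divisors2 num power out) := by
  unfold Spec_sum_of_divisors2; infer_instance

-- ===== CLAIM (what is proved, stated in full; the proofs are below) =====
def Claim_equal_sum_of_divisors2 : Prop :=
  ∀ (num : Int) (power : Int), Dom_sum_of_divisors2 num power →
    Pre_sum_of_divisors2 num power →
    Spec_sum_of_divisors2 num power (sum_of_divisors2 num power)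

-- ===== LEMMAS AND PROOFS =====

-- ---- Nat-level models of the two loops (proof ghosts) ----
def ndiv : Nat → Nat → Nat → Nat → Nat × Nat
  | 0, m, _, c => (m, c)
  | fuel + 1, m, f, c => if m % f = 0 then ndiv fuel (m / f) f (c + 1) else (m, c)

def noddL : Nat → Nat → Nat → Nat → List (Nat × Nat) → Nat × List (Nat × Nat)
  | 0, m, _, _, acc => (m, acc)
  | fuel + 1, m, factor, sq, acc =>
      if factor * factor ≤ sq then
        let r := ndiv m m factor 0
        noddL fuel r.1 (factor + 2) r.1 (if 0 < r.2 then acc ++ [(factor, r.2)] else acc)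
      else (m, acc)

def nfactorsList (n : Nat) : List (Nat × Nat) :=
  let r2 := ndiv n n 2 0
  let acc0 := if 0 < r2.2 then [(2, r2.2)] else []
  let ro := noddL n r2.1 3 n acc0
  if 1 < ro.1 then ro.2 ++ [(ro.1, 1)] else ro.2

def nsum : Nat → Nat → Nat → Nat → Nat → Nat
  | 0, _, _, _, t => t
  | fuel + 1, n, k, i, t =>
      if i * i ≤ n then
        nsum fuel n k (i + 1)
          (if n % i = 0 then (t + i ^ k) + (if n / i ≠ i then (n / i) ^ k else 0) else t)
      else t

def castPair (pe : Nat × Nat) : Int × Int := ((pe.1 : Int), (pe.2 : Int))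

-- ---- cast bridges: the Int ports compute the Nat models on nonnegative inputs ----
lemma pvTrial_cast (fuel : Nat) : ∀ (m f c : Nat),
    pvTrial fuel (m : Int) (f : Int) (c : Int) =
      (((ndiv fuel m f c).1 : Int), ((ndiv fuel m f c).2 : Int)) := by
  induction fuel with
  | zero => intro m f c; simp [pvTrial, ndiv]
  | succ fuel ih =>
    intro m f c
    simp only [pvTrial, ndiv, PySem.Int.mod_natCast, PySem.Int.floordiv_natCast]
    by_cases h : m % f = 0
    · simp only [h, Nat.cast_zero]
      have := ih (m / f) f (c + 1)
      simpa using this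
    · have hz : ((m % f : Nat) : Int) ≠ 0 := by exact_mod_cast h
      simp only [h, hz, if_false]

lemma pvOdd_cast (fuel : Nat) : ∀ (m factor sq : Nat) (acc : List (Nat × Nat)),
    pvOdd fuel (m : Int) (factor : Int) (sq : Int) (acc.map castPair) =
      (((noddL fuel m factor sq acc).1 : Int), (noddL fuel m factor sq acc).2.map castPair) := by
  induction fuel with
  | zero => intro m factor sq acc; simp [pvOdd, noddL]
  | succ fuel ih =>
    intro m factor sq acc
    simp only [pvOdd, noddL]
    by_cases h : factor * factor ≤ sq
    · have hI : (factor : Int) * (factor : Int) ≤ (sq : Int) := by exact_mod_cast h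
      rw [if_pos hI, if_pos h]
      simp only [Int.toNat_natCast]
      rw [show (0 : Int) = ((0 : Nat) : Int) from rfl, pvTrial_cast m m factor 0]
      dsimp only
      simp only [Nat.cast_zero]
      by_cases hr : 0 < (ndiv m m factor 0).2
      · have hrI : (0 : Int) < ((ndiv m m factor 0).2 : Int) := by exact_mod_cast hr
        rw [if_pos hrI, if_pos hr]
        have := ih (ndiv m m factor 0).1 (factor + 2) (ndiv m m factor 0).1
          (acc ++ [(factor, (ndiv m m factor 0).2)])
        simpa [castPair, List.map_append] using this
      · have hrI : ¬ (0 : Int) < ((ndiv m m factor 0).2 : Int) := by exact_mod_cast hr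
        rw [if_neg hrI, if_neg hr]
        have := ih (ndiv m m factor 0).1 (factor + 2) (ndiv m m factor 0).1 acc
        simpa [castPair] using this
    · have hI : ¬ ((factor : Int) * (factor : Int) ≤ (sq : Int)) := by exact_mod_cast h
      rw [if_neg hI, if_neg h]

lemma pvPrimeFactors2_cast (n : Nat) :
    pvPrimeFactors2 (n : Int) = (nfactorsList n).map castPair := by
  unfold pvPrimeFactors2 nfactorsList
  simp only [Int.toNat_natCast]
  rw [show (0 : Int) = ((0 : Nat) : Int) from rfl, show (2 : Int) = ((2 : Nat) : Int) from rfl,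
    pvTrial_cast n n 2 0]
  dsimp only
  simp only [Nat.cast_zero]
  have hacc : (if (0 : Int) < ((ndiv n n 2 0).2 : Int)
        then [(((2 : Nat) : Int), ((ndiv n n 2 0).2 : Int))] else ([] : List (Int × Int))) =
      (if 0 < (ndiv n n 2 0).2 then [((2 : Nat), (ndiv n n 2 0).2)]
        else ([] : List (Nat × Nat))).map castPair := by
    by_cases hr : 0 < (ndiv n n 2 0).2
    · have hrI : (0 : Int) < ((ndiv n n 2 0).2 : Int) := by exact_mod_cast hr
      simp [hr, hrI, castPair]
    · have hrI : ¬ (0 : Int) < ((ndiv n n 2 0).2 : Int) := by exact_mod_cast hr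
      simp [hr, hrI]
  rw [hacc, show (3 : Int) = ((3 : Nat) : Int) from rfl, pvOdd_cast]
  by_cases ho : 1 < (noddL n (ndiv n n 2 0).1 3 n
      (if 0 < (ndiv n n 2 0).2 then [((2 : Nat), (ndiv n n 2 0).2)] else [])).1
  · have hoI : (1 : Int) < ((noddL n (ndiv n n 2 0).1 3 n
        (if 0 < (ndiv n n 2 0).2 then [((2 : Nat), (ndiv n n 2 0).2)] else [])).1 : Int) := by
      exact_mod_cast ho
    simp [ho, hoI, castPair]
  · have hoI : ¬ (1 : Int) < ((noddL n (ndiv n n 2 0).1 3 n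
        (if 0 < (ndiv n n 2 0).2 then [((2 : Nat), (ndiv n n 2 0).2)] else [])).1 : Int) := by
      exact_mod_cast ho
    simp [ho, hoI]

lemma pvSumLoop_cast (fuel : Nat) (power : Int) : ∀ (n i t : Nat),
    pvSumLoop fuel (n : Int) power (i : Int) ((t : Nat) : Int) =
      ((nsum fuel n power.toNat i t : Nat) : Int) := by
  induction fuel with
  | zero => intro n i t; simp [pvSumLoop, nsum]
  | succ fuel ih =>
    intro n i t
    simp only [pvSumLoop, nsum, PySem.Int.mod_natCast, PySem.Int.floordiv_natCast]
    by_cases h : i * i ≤ n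
    · have hI : (i : Int) * (i : Int) ≤ (n : Int) := by exact_mod_cast h
      rw [if_pos hI, if_pos h]
      by_cases hd : n % i = 0
      · have hdI : ((n % i : Nat) : Int) = 0 := by exact_mod_cast hd
        rw [if_pos hdI, if_pos hd]
        by_cases hq : n / i ≠ i
        · have hqI : ((n / i : Nat) : Int) ≠ (i : Int) := by exact_mod_cast hq
          rw [if_pos hqI, if_pos hq]
          have := ih n (i + 1) ((t + i ^ power.toNat) + (n / i) ^ power.toNat)
          push_cast at this ⊢
          convert this using 3 <;> push_cast <;> ring
        · have hqI : ¬ ((n / i : Nat) : Int) ≠ (i : Int) := by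
            simp only [ne_eq, not_not] at hq ⊢; exact_mod_cast hq
          rw [if_neg hqI, if_neg hq]
          have := ih n (i + 1) (t + i ^ power.toNat)
          push_cast at this ⊢
          simpa using this
      · have hdI : ¬ ((n % i : Nat) : Int) = 0 := by exact_mod_cast hd
        rw [if_neg hdI, if_neg hd]
        have := ih n (i + 1) t
        push_cast at this ⊢
        exact this
    · have hI : ¬ ((i : Int) * (i : Int) ≤ (n : Int)) := by exact_mod_cast h
      rw [if_neg hI, if_neg h]

-- ---- the trial-division inner loop fully strips the factor f ----
lemma ndiv_spec (fuel : Nat) : ∀ (m f c : Nat), 2 ≤ f → 1 ≤ m → m ≤ fuel →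
    1 ≤ (ndiv fuel m f c).1 ∧ ¬ f ∣ (ndiv fuel m f c).1 ∧
      ∃ e, (ndiv fuel m f c).2 = c + e ∧ m = f ^ e * (ndiv fuel m f c).1 := by
  induction fuel with
  | zero => intro m f c _ hm hfuel; omega
  | succ fuel ih =>
    intro m f c hf hm hfuel
    simp only [ndiv]
    by_cases h : m % f = 0
    · rw [if_pos h]
      have hdvd : f ∣ m := Nat.dvd_of_mod_eq_zero h
      have hmf1 : 1 ≤ m / f := (Nat.one_le_div_iff (by omega)).mpr (Nat.le_of_dvd (by omega) hdvd)
      have hlt : m / f < m := Nat.div_lt_self (by omega) (by omega)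
      obtain ⟨h1, h2, e, he, hprod⟩ := ih (m / f) f (c + 1) hf hmf1 (by omega)
      refine ⟨h1, h2, e + 1, by omega, ?_⟩
      calc m = f * (m / f) := (Nat.mul_div_cancel' hdvd).symm
        _ = f * (f ^ e * (ndiv fuel (m / f) f (c + 1)).1) := by rw [← hprod]
        _ = f ^ (e + 1) * (ndiv fuel (m / f) f (c + 1)).1 := by ring
    · rw [if_neg h]
      exact ⟨hm, fun hd => h (Nat.dvd_iff_mod_eq_zero.mp hd), 0, by omega, by simp⟩

-- ---- the odd-factor loop: invariant and output characterisation ----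
lemma noddL_spec (fuel : Nat) : ∀ (m factor sq : Nat) (acc : List (Nat × Nat)),
    1 ≤ m → m ≤ sq → 3 ≤ factor → factor % 2 = 1 →
    (∀ p, p.Prime → p ∣ m → factor ≤ p) →
    sq + 3 ≤ 2 * fuel + factor →
    ∃ L m',
      noddL fuel m factor sq acc = (m', acc ++ L) ∧
      m = (L.map (fun pe => pe.1 ^ pe.2)).prod * m' ∧
      1 ≤ m' ∧ (m' = 1 ∨ m'.Prime) ∧
      List.Pairwise (fun a b => a.1 < b.1) L ∧
      (∀ pe ∈ L, pe.1.Prime ∧ 1 ≤ pe.2 ∧ factor ≤ pe.1) ∧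
      (∀ pe ∈ L, ∀ p, p.Prime → p ∣ m' → pe.1 < p) := by
  induction fuel with
  | zero =>
    intro m factor sq acc h1 h2 h3 _ h5 h6
    refine ⟨[], m, by simp [noddL], by simp, h1, ?_, by simp, by simp, by simp⟩
    by_cases hm1 : m = 1
    · exact Or.inl hm1
    · exfalso
      have hp := Nat.minFac_prime hm1
      have := h5 m.minFac hp (Nat.minFac_dvd m)
      have := Nat.le_of_dvd (by omega) (Nat.minFac_dvd m)
      omega
  | succ fuel ih =>
    intro m factor sq acc h1 h2 h3 h4 h5 h6
    simp only [noddL]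
    by_cases h : factor * factor ≤ sq
    · rw [if_pos h]
      obtain ⟨hr1, hrnd, e, hre, hrprod⟩ := ndiv_spec m m factor 0 (by omega) h1 le_rfl
      have hrdvd : (ndiv m m factor 0).1 ∣ m := Dvd.intro_left (factor ^ e) hrprod.symm
      have hrle : (ndiv m m factor 0).1 ≤ m := Nat.le_of_dvd (by omega) hrdvd
      have hpr : ∀ p, p.Prime → p ∣ (ndiv m m factor 0).1 → factor + 2 ≤ p := by
        intro p pp pd
        have hdm : p ∣ m := pd.trans hrdvd
        have hf : factor ≤ p := h5 p pp hdm
        have hne1 : p ≠ factor := fun hh => hrnd (hh ▸ pd)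
        have hne2 : p ≠ factor + 1 := by
          intro hh
          have h2d : 2 ∣ p := Nat.dvd_of_mod_eq_zero (by omega)
          have := (Nat.Prime.eq_one_or_self_of_dvd pp 2 h2d)
          omega
        omega
      obtain ⟨L, m', hres, hprod', hm'1, hm'p, hLpw, hLmem, hLlt⟩ :=
        ih (ndiv m m factor 0).1 (factor + 2) (ndiv m m factor 0).1
          (if 0 < (ndiv m m factor 0).2 then acc ++ [(factor, (ndiv m m factor 0).2)] else acc)
          hr1 le_rfl (by omega) (by omega) hpr (by omega)
      have hm'dvd : m' ∣ (ndiv m m factor 0).1 := Dvd.intro_left _ hprod'.symm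
      by_cases hc : 0 < (ndiv m m factor 0).2
      · rw [if_pos hc] at hres ⊢
        have hfe : 1 ≤ e := by omega
        have hfdvd : factor ∣ m := by
          rw [hrprod]
          exact dvd_mul_of_dvd_left (dvd_pow_self factor (by omega)) _
        have hfprime : factor.Prime := by
          have hne1 : factor ≠ 1 := by omega
          have hp := Nat.minFac_prime hne1
          have hmem : factor.minFac ∣ m := (Nat.minFac_dvd factor).trans hfdvd
          have hge := h5 factor.minFac hp hmem
          have hle := Nat.minFac_le (show 0 < factor by omega)
          have : factor.minFac = factor := le_antisymm hle hge
          exact this ▸ hp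
        refine ⟨(factor, (ndiv m m factor 0).2) :: L, m', by rw [hres]; simp, ?_, hm'1, hm'p,
          ?_, ?_, ?_⟩
        · simp only [List.map_cons, List.prod_cons, hre, Nat.zero_add]
          conv_lhs => rw [hrprod, hprod']
          ring
        · refine List.pairwise_cons.mpr ⟨?_, hLpw⟩
          intro pe hpe
          have := (hLmem pe hpe).2.2
          simp only
          omega
        · intro pe hpe
          rcases List.mem_cons.mp hpe with rfl | hpe
          · exact ⟨hfprime, by omega, le_rfl⟩
          · have := hLmem pe hpe
            exact ⟨this.1, this.2.1, by omega⟩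
        · intro pe hpe p pp pd
          rcases List.mem_cons.mp hpe with rfl | hpe
          · have : p ∣ (ndiv m m factor 0).1 := pd.trans hm'dvd
            have := hpr p pp this
            simp only
            omega
          · exact hLlt pe hpe p pp pd
      · rw [if_neg hc] at hres ⊢
        have he0 : e = 0 := by omega
        have hmeq : m = (ndiv m m factor 0).1 := by
          conv_lhs => rw [hrprod]
          rw [he0, pow_zero, one_mul]
        refine ⟨L, m', hres, by rw [hmeq]; exact hprod', hm'1, hm'p, hLpw, ?_, hLlt⟩
        intro pe hpe
        have := hLmem pe hpe
        exact ⟨this.1, this.2.1, by omega⟩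
    · rw [if_neg h]
      refine ⟨[], m, by simp, by simp, h1, ?_, by simp, by simp, by simp⟩
      by_cases hm1 : m = 1
      · exact Or.inl hm1
      · right
        by_contra hnp
        have hsq := Nat.minFac_sq_le_self (show 0 < m by omega) hnp
        have hge := h5 m.minFac (Nat.minFac_prime hm1) (Nat.minFac_dvd m)
        have : factor * factor ≤ m.minFac * m.minFac := Nat.mul_le_mul hge hge
        rw [Nat.pow_two] at hsq
        omega

-- ---- the factor list of n: increasing prime powers with product n ----
lemma nfactorsList_good (n : Nat) (hn : 2 ≤ n) :
    List.Pairwise (fun a b : Nat × Nat => a.1 < b.1) (nfactorsList n) ∧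
    (∀ pe ∈ nfactorsList n, pe.1.Prime ∧ 1 ≤ pe.2) ∧
    ((nfactorsList n).map (fun pe => pe.1 ^ pe.2)).prod = n := by
  obtain ⟨hr1, hrnd, e2, hre, hrprod⟩ := ndiv_spec n n 2 0 (by omega) (by omega) le_rfl
  have hm1dvd : (ndiv n n 2 0).1 ∣ n := Dvd.intro_left _ hrprod.symm
  have hm1le : (ndiv n n 2 0).1 ≤ n := Nat.le_of_dvd (by omega) hm1dvd
  have hodd : ∀ p, p.Prime → p ∣ (ndiv n n 2 0).1 → 3 ≤ p := by
    intro p pp pd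
    have h2 := pp.two_le
    rcases Nat.lt_or_ge p 3 with hlt | hge
    · have hp2 : p = 2 := by omega
      exact absurd (hp2 ▸ pd) hrnd
    · exact hge
  obtain ⟨L, m', hres, hprodL, hm'1, hm'p, hLpw, hLmem, hLlt⟩ :=
    noddL_spec n (ndiv n n 2 0).1 3 n
      (if 0 < (ndiv n n 2 0).2 then [(2, (ndiv n n 2 0).2)] else []) hr1 hm1le (by omega)
      (by omega) hodd (by omega)
  have hm'dvd : m' ∣ (ndiv n n 2 0).1 := Dvd.intro_left _ hprodL.symm
  have hF : nfactorsList n =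
      if 1 < m' then
        ((if 0 < (ndiv n n 2 0).2 then [(2, (ndiv n n 2 0).2)] else []) ++ L) ++ [(m', 1)]
      else (if 0 < (ndiv n n 2 0).2 then [(2, (ndiv n n 2 0).2)] else []) ++ L := by
    unfold nfactorsList
    dsimp only
    rw [hres]
  have hA : ∀ pe ∈ (if 0 < (ndiv n n 2 0).2 then [((2 : Nat), (ndiv n n 2 0).2)] else []),
      pe = (2, (ndiv n n 2 0).2) ∧ 1 ≤ (ndiv n n 2 0).2 := by
    intro pe hpe
    by_cases hc : 0 < (ndiv n n 2 0).2
    · rw [if_pos hc] at hpe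
      simp at hpe
      exact ⟨by simp [hpe], by omega⟩
    · rw [if_neg hc] at hpe
      simp at hpe
  have hAL : List.Pairwise (fun a b : Nat × Nat => a.1 < b.1)
      ((if 0 < (ndiv n n 2 0).2 then [((2 : Nat), (ndiv n n 2 0).2)] else []) ++ L) := by
    refine List.pairwise_append.mpr ⟨?_, hLpw, ?_⟩
    · by_cases hc : 0 < (ndiv n n 2 0).2 <;> simp [hc]
    · intro a ha b hb
      have := (hA a ha).1
      have hb3 := (hLmem b hb).2.2
      rw [this]
      simpa using by omega
  have hALmem : ∀ pe ∈ (if 0 < (ndiv n n 2 0).2 then [((2 : Nat), (ndiv n n 2 0).2)] else []) ++ L,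
      pe.1.Prime ∧ 1 ≤ pe.2 := by
    intro pe hpe
    rcases List.mem_append.mp hpe with hpe | hpe
    · obtain ⟨heq, hge⟩ := hA pe hpe
      rw [heq]
      exact ⟨Nat.prime_two, hge⟩
    · exact ⟨(hLmem pe hpe).1, (hLmem pe hpe).2.1⟩
  have hALprod : (((if 0 < (ndiv n n 2 0).2 then [((2 : Nat), (ndiv n n 2 0).2)] else []) ++ L).map
      (fun pe => pe.1 ^ pe.2)).prod * m' = n := by
    by_cases hc : 0 < (ndiv n n 2 0).2
    · rw [if_pos hc]
      simp only [List.map_append, List.prod_append, List.map_cons, List.map_nil,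
        List.prod_cons, List.prod_nil]
      conv_rhs => rw [hrprod, hprodL]
      rw [hre]
      ring
    · rw [if_neg hc]
      have he0 : e2 = 0 := by omega
      simp only [List.nil_append]
      conv_rhs => rw [hrprod, hprodL]
      rw [he0]
      ring
  by_cases hm : 1 < m'
  · have hm'prime : m'.Prime := hm'p.resolve_left (by omega)
    have hm'3 : 3 ≤ m' := by
      rcases Nat.lt_or_ge m' 3 with hlt | hge
      · have : m' = 2 := by omega
        exact absurd (this ▸ hm'dvd) (by
          intro hdd
          exact hrnd (by exact_mod_cast hdd))
      · exact hge
    rw [hF, if_pos hm]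
    refine ⟨?_, ?_, ?_⟩
    · refine List.pairwise_append.mpr ⟨hAL, by simp, ?_⟩
      intro a ha b hb
      simp only [List.mem_singleton] at hb
      subst hb
      rcases List.mem_append.mp ha with ha | ha
      · have := (hA a ha).1
        rw [this]
        simpa using by omega
      · exact hLlt a ha m' hm'prime dvd_rfl
    · intro pe hpe
      rcases List.mem_append.mp hpe with hpe | hpe
      · exact hALmem pe hpe
      · simp only [List.mem_singleton] at hpe
        rw [hpe]
        exact ⟨hm'prime, le_rfl⟩
    · simp only [List.map_append, List.prod_append, List.map_cons, List.map_nil,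
        List.prod_cons, List.prod_nil, pow_one, mul_one]
      rw [List.map_append, List.prod_append] at hALprod
      exact hALprod
  · have hm'eq : m' = 1 := by omega
    rw [hF, if_neg hm]
    refine ⟨hAL, hALmem, ?_⟩
    rw [hm'eq, mul_one] at hALprod
    exact hALprod

-- ---- one factor's contribution: exact geometric-series division = σ_k(p^e) ----
lemma term_eq_sigma (power : Int) (hpow : 1 ≤ power) (p e : Nat) (hp : p.Prime) :
    PySem.Int.floordiv ((p : Int) ^ (power * ((e : Int) + 1)).toNat - 1)
        ((p : Int) ^ power.toNat - 1) =
      ((ArithmeticFunction.sigma power.toNat (p ^ e) : Nat) : Int) := by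
  have hpow' : ((power.toNat : Int)) = power := Int.toNat_of_nonneg (by omega)
  have h1 : (power * ((e : Int) + 1)).toNat = power.toNat * (e + 1) := by
    rw [show power * ((e : Int) + 1) = ((power.toNat * (e + 1) : Nat) : Int) by
      push_cast [hpow']; ring, Int.toNat_natCast]
  rw [h1]
  have hp1 : (1 : Int) < (p : Int) := by exact_mod_cast hp.one_lt
  have hx : (1 : Int) < (p : Int) ^ power.toNat := by
    calc (1 : Int) = 1 ^ power.toNat := (one_pow _).symm
      _ < (p : Int) ^ power.toNat := by
        apply pow_lt_pow_left₀ hp1 (by norm_num)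
        omega
  have hgeom := geom_sum_mul ((p : Int) ^ power.toNat) (e + 1)
  have hnum : (p : Int) ^ (power.toNat * (e + 1)) - 1 =
      (∑ i ∈ Finset.range (e + 1), ((p : Int) ^ power.toNat) ^ i) *
        ((p : Int) ^ power.toNat - 1) := by
    rw [hgeom, pow_mul]
  rw [hnum, PySem.Int.floordiv_eq_ediv_of_pos (by omega),
    Int.mul_ediv_cancel _ (by omega)]
  rw [ArithmeticFunction.sigma_apply_prime_pow hp]
  push_cast
  refine Finset.sum_congr rfl ?_
  intro i _
  rw [← pow_mul, mul_comm]

-- ---- folding A's product over a good factor list gives σ_k of the product ----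
lemma fold_eq_sigma (power : Int) (hpow : 1 ≤ power) :
    ∀ (F : List (Nat × Nat)), List.Pairwise (fun a b : Nat × Nat => a.1 < b.1) F →
      (∀ pe ∈ F, pe.1.Prime ∧ 1 ≤ pe.2) → ∀ (t : Int),
      (F.map castPair).foldl
          (fun t pe =>
            t * PySem.Int.floordiv (pe.1 ^ (power * (pe.2 + 1)).toNat - 1) (pe.1 ^ power.toNat - 1))
          t =
        t * ((ArithmeticFunction.sigma power.toNat ((F.map (fun pe => pe.1 ^ pe.2)).prod) : Nat) : Int) := by
  intro F
  induction F with
  | nil => intro _ _ t; simp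
  | cons pe F ih =>
    intro hpw hmem t
    have hpe := hmem pe (by simp)
    simp only [List.map_cons, List.foldl_cons, List.prod_cons]
    have hterm := term_eq_sigma power hpow pe.1 pe.2 hpe.1
    have hco : Nat.Coprime (pe.1 ^ pe.2) ((F.map fun pe => pe.1 ^ pe.2).prod) := by
      apply Nat.Coprime.pow_left
      apply Nat.coprime_list_prod_right_iff.mpr
      intro x hx
      rcases List.mem_map.mp hx with ⟨qe, hqe, rfl⟩
      have hq := (hmem qe (by simp [hqe])).1
      have hlt : pe.1 < qe.1 := (List.pairwise_cons.mp hpw).1 qe hqe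
      exact Nat.Coprime.pow_right _
        ((Nat.coprime_primes hpe.1 hq).mpr (by omega))
    have hmul := (ArithmeticFunction.isMultiplicative_sigma (k := power.toNat)).map_mul_of_coprime hco
    rw [show castPair pe = ((pe.1 : Int), (pe.2 : Int)) from rfl]
    dsimp only
    rw [hterm, ih (List.pairwise_cons.mp hpw).2 (fun qe hqe => hmem qe (by simp [hqe]))]
    rw [hmul]
    push_cast
    ring

-- ---- A computes σ_k(n) ----
lemma portA_eq_sigma (num power : Int) (hnum : 2 ≤ num) (hpow : 1 ≤ power) :
    sum_of_divisors2 num power =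
      ((ArithmeticFunction.sigma power.toNat num.toNat : Nat) : Int) := by
  have h0 : num = ((num.toNat : Nat) : Int) := (Int.toNat_of_nonneg (by omega)).symm
  obtain ⟨hpw, hmem, hprod⟩ := nfactorsList_good num.toNat (by omega)
  unfold sum_of_divisors2
  rw [h0, pvPrimeFactors2_cast num.toNat,
    fold_eq_sigma power hpow (nfactorsList num.toNat) hpw hmem 1, hprod, one_mul,
    Int.toNat_natCast]

-- ---- B's loop sums the paired divisor weights ----
lemma nsum_spec (k : Nat) : ∀ (fuel n i t : Nat), 1 ≤ i → 1 ≤ n → n + 1 ≤ fuel + i →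
    nsum fuel n k i t =
      t + ∑ d ∈ n.divisors.filter (fun d => i ≤ d ∧ d * d ≤ n),
            (d ^ k + if d * d ≠ n then (n / d) ^ k else 0) := by
  intro fuel
  induction fuel with
  | zero =>
    intro n i t _ _ hf
    have hempty : n.divisors.filter (fun d => i ≤ d ∧ d * d ≤ n) = ∅ := by
      apply Finset.filter_eq_empty_iff.mpr
      intro d hd
      have := Nat.divisor_le hd
      omega
    simp [nsum, hempty]
  | succ fuel ih =>
    intro n i t h1 hn hf
    simp only [nsum]
    by_cases h : i * i ≤ n
    · rw [if_pos h]
      rw [ih n (i + 1) _ (by omega) hn (by omega)]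
      by_cases hd : n % i = 0
      · have hdvd : i ∣ n := Nat.dvd_of_mod_eq_zero hd
        have himem : i ∈ n.divisors := Nat.mem_divisors.mpr ⟨hdvd, by omega⟩
        have hni : n = i * (n / i) := (Nat.mul_div_cancel' hdvd).symm
        have hqieq : (n / i = i) ↔ (i * i = n) := by
          constructor
          · intro hq
            rw [hni, hq]
          · intro hq
            rw [← hq, Nat.mul_div_cancel_left i (by omega : 0 < i)]
        have hqi : (if n / i ≠ i then (n / i) ^ k else 0) =
            (if i * i ≠ n then (n / i) ^ k else 0) := by
          by_cases hq : n / i = i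
          · rw [if_neg (by simpa using hq), if_neg (by simpa using hqieq.mp hq)]
          · rw [if_pos hq, if_pos (fun hEq => hq (hqieq.mpr hEq))]
        have hsplit : n.divisors.filter (fun d => i ≤ d ∧ d * d ≤ n) =
            insert i (n.divisors.filter (fun d => i + 1 ≤ d ∧ d * d ≤ n)) := by
          ext d
          simp only [Finset.mem_filter, Finset.mem_insert]
          constructor
          · rintro ⟨hdmem, hcond⟩
            by_cases hdi : d = i
            · exact Or.inl hdi
            · exact Or.inr ⟨hdmem, by omega, hcond.2⟩
          · rintro (rfl | ⟨hdmem, hge, hle⟩)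
            · exact ⟨himem, le_rfl, h⟩
            · exact ⟨hdmem, by omega, hle⟩
        have hnotmem : i ∉ n.divisors.filter (fun d => i + 1 ≤ d ∧ d * d ≤ n) := by
          simp
        rw [if_pos hd, hsplit, Finset.sum_insert hnotmem, hqi]
        ring
      · have hndvd : ¬ i ∣ n := fun hdd => hd (Nat.dvd_iff_mod_eq_zero.mp hdd)
        have hsplit : n.divisors.filter (fun d => i ≤ d ∧ d * d ≤ n) =
            n.divisors.filter (fun d => i + 1 ≤ d ∧ d * d ≤ n) := by
          ext d
          simp only [Finset.mem_filter]
          constructor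
          · rintro ⟨hdmem, hcond⟩
            have hdi : d ≠ i := fun hEq =>
              hndvd (hEq ▸ (Nat.mem_divisors.mp hdmem).1)
            exact ⟨hdmem, by omega, hcond.2⟩
          · rintro ⟨hdmem, hge, hle⟩
            exact ⟨hdmem, by omega, hle⟩
        rw [if_neg hd, hsplit]
    · rw [if_neg h]
      have hempty : n.divisors.filter (fun d => i ≤ d ∧ d * d ≤ n) = ∅ := by
        apply Finset.filter_eq_empty_iff.mpr
        intro d _ hcond
        have := Nat.mul_le_mul hcond.1 hcond.1
        omega
      simp [hempty]

-- ---- pairing: small-divisor weights sum to the full divisor-power sum ----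
lemma pairing (n k : Nat) (hn : 1 ≤ n) :
    (∑ d ∈ n.divisors.filter (fun d => d * d ≤ n),
        (d ^ k + if d * d ≠ n then (n / d) ^ k else 0)) =
      ArithmeticFunction.sigma k n := by
  have hne : n ≠ 0 := by omega
  rw [ArithmeticFunction.sigma_apply]
  rw [← Finset.sum_filter_add_sum_filter_not n.divisors (fun d => d * d ≤ n) (fun d => d ^ k)]
  rw [Finset.sum_add_distrib]
  congr 1
  have hstep : (∑ d ∈ n.divisors.filter (fun d => d * d ≤ n),
      (if d * d ≠ n then (n / d) ^ k else 0)) =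
      ∑ d ∈ n.divisors.filter (fun d => d * d < n), (n / d) ^ k := by
    rw [Finset.sum_filter, Finset.sum_filter]
    apply Finset.sum_congr rfl
    intro d _
    by_cases hlt : d * d < n
    · rw [if_pos (by omega), if_pos (by omega), if_pos hlt]
    · by_cases hle : d * d ≤ n
      · rw [if_pos hle, if_neg (by omega), if_neg hlt]
      · rw [if_neg hle, if_neg hlt]
  rw [hstep]
  refine Finset.sum_nbij' (fun d => n / d) (fun d => n / d) ?_ ?_ ?_ ?_ ?_
  · intro d hd
    simp only [Finset.mem_filter, Nat.mem_divisors] at hd ⊢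
    obtain ⟨⟨hdvd, _⟩, hlt⟩ := hd
    have hdpos : 0 < d := Nat.pos_of_dvd_of_pos hdvd (by omega)
    have hni : n = d * (n / d) := (Nat.mul_div_cancel' hdvd).symm
    have hqpos : 0 < n / d := by
      rcases Nat.eq_zero_or_pos (n / d) with h0 | h0
      · rw [h0, Nat.mul_zero] at hni; omega
      · exact h0
    refine ⟨⟨Nat.div_dvd_of_dvd hdvd, hne⟩, ?_⟩
    have hdq : d < n / d := by
      by_contra hge
      have : d * (n / d) ≤ d * d := Nat.mul_le_mul_left d (by omega)
      omega
    have : d * (n / d) < (n / d) * (n / d) := Nat.mul_lt_mul_of_pos_right hdq hqpos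
    omega
  · intro d hd
    simp only [Finset.mem_filter, Nat.mem_divisors] at hd ⊢
    obtain ⟨⟨hdvd, _⟩, hgt⟩ := hd
    have hdpos : 0 < d := Nat.pos_of_dvd_of_pos hdvd (by omega)
    have hni : n = d * (n / d) := (Nat.mul_div_cancel' hdvd).symm
    refine ⟨⟨Nat.div_dvd_of_dvd hdvd, hne⟩, ?_⟩
    have hni' : n = (n / d) * d := (Nat.div_mul_cancel hdvd).symm
    have hqpos : 0 < n / d := by
      rcases Nat.eq_zero_or_pos (n / d) with h0 | h0
      · rw [h0, Nat.mul_zero] at hni; omega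
      · exact h0
    have hqd : n / d < d := by
      by_contra hge
      have : d * d ≤ d * (n / d) := Nat.mul_le_mul_left d (by omega)
      omega
    have : (n / d) * (n / d) < (n / d) * d := Nat.mul_lt_mul_of_pos_left hqd hqpos
    omega
  · intro d hd
    simp only [Finset.mem_filter, Nat.mem_divisors] at hd
    exact Nat.div_div_self hd.1.1 hne
  · intro d hd
    simp only [Finset.mem_filter, Nat.mem_divisors] at hd
    exact Nat.div_div_self hd.1.1 hne
  · intro d _
    rfl

-- ---- B computes σ_k(n) ----
lemma portB_eq_sigma (num power : Int) (hnum : 1 ≤ num) (hpow : 1 ≤ power) :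
    sum_of_divisors2_alt num power =
      ((ArithmeticFunction.sigma power.toNat num.toNat : Nat) : Int) := by
  have h0 : num = ((num.toNat : Nat) : Int) := (Int.toNat_of_nonneg (by omega)).symm
  unfold sum_of_divisors2_alt
  rw [h0]
  simp only [Int.toNat_natCast]
  rw [show (1 : Int) = ((1 : Nat) : Int) from rfl, show (0 : Int) = ((0 : Nat) : Int) from rfl,
    pvSumLoop_cast (num.toNat + 1) power num.toNat 1 0,
    nsum_spec power.toNat (num.toNat + 1) num.toNat 1 0 le_rfl (by omega) (by omega)]
  have hfe : (num.toNat.divisors.filter (fun d => 1 ≤ d ∧ d * d ≤ num.toNat)) =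
      num.toNat.divisors.filter (fun d => d * d ≤ num.toNat) := by
    apply Finset.filter_congr
    intro d hd
    have := Nat.pos_of_mem_divisors hd
    omega
  rw [hfe, pairing num.toNat power.toNat (by omega), Nat.zero_add]

-- ===== VERDICT (by name: the statement is the Claim_ definition above) =====
theorem sum_of_divisors2_spec : Claim_equal_sum_of_divisors2 := by
  intro num power _ hpre
  unfold Spec_sum_of_divisors2
  rw [portA_eq_sigma num power hpre.1 hpre.2,
    portB_eq_sigma num power (by exact le_trans (by norm_num) hpre.1) hpre.2]
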